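-- pv_equiv track=rewrite | github.com/arvidarvidarvid/adventofcode | 2016/day06/day.py | recover_message
-- ===== SOURCE A (Python) =====
-- def recover_message(rows, reversed=False):
--
--     reversed = not reversed
--     chars = [chr(i) for i in range(97, 123)]
--     message = ''
--     for i in range(len(rows[0])):
--         candidates = []
--         for row in rows:
--             candidates.append(row[i])
--         counts = []
--         for c in chars:
--             if candidates.count(c) != 0:
--                 counts.append((candidates.count(c), c))
--         counts = sorted(counts, reverse=reversed)
--         message += counts[0][1]
--
--     return message
-- ===== SOURCE B (Python) =====
-- def recover_message(rows, reversed=False):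
--     flag = not reversed
--     ncols = len(rows[0])
--     # one row-major tabulation pass: per-column letter counts
--     table = [[0] * 26 for _ in range(ncols)]
--     for row in rows:
--         for i in range(ncols):
--             c = row[i]
--             if 'a' <= c <= 'z':
--                 table[i][ord(c) - 97] += 1
--     # separate selection pass: best (count, char) per column by a linear scan
--     out = []
--     for i in range(ncols):
--         best = None
--         for k in range(26):
--             cnt = table[i][k]
--             if cnt != 0:
--                 cand = (cnt, chr(97 + k))
--                 if best is None or (cand > best if flag else cand < best):
--                     best = cand
--         out.append(best[1])
--     return ''.join(out)
-- ===== Notes on version B (the rewrite author's own statement) =====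
-- stated objective: faster
-- what changed: Replaces A's per-column rescans (building candidates and calling candidates.count twice per letter, then sorting 26 tuples and taking [0]) by one row-major tabulation pass filling per-column letter-count tables followed by a separate linear selection scan over the 26 counts per column.
import Mathlib
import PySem

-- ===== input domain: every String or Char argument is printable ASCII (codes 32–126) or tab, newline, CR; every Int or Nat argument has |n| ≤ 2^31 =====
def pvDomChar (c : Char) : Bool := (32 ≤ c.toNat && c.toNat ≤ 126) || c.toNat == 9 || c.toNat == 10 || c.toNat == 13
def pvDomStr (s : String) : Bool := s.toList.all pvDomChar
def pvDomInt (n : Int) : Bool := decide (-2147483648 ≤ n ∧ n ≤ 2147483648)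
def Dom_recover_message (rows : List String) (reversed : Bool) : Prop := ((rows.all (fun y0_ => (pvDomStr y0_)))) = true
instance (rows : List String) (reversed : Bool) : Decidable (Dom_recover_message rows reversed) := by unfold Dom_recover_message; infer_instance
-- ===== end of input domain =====

-- B replaces A's per-column rescans (candidates list + candidates.count per letter + a sort per
-- column) by one row-major tabulation pass plus a separate linear selection scan per column.

-- shared indexing primitive: Python's row[i] (exact via PySem.Str.pyGet?); the default ' ' is only
-- reached where Python raises IndexError, which Pre_ excludes.
def pyCharD (row : String) (i : Int) : Char := (PySem.Str.pyGet? row i).getD ' '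

-- ===== PORT A =====
def recover_message (rows : List String) (reversed : Bool) : String :=
  let rev := !reversed
  let chars : List Char := (PySem.List.pyRange 97 123).map (fun n => Char.ofNat n.toNat)
  let row0 : String := PySem.List.pyGetD rows 0 ""
  let message : List Char :=
    (PySem.List.pyRange 0 (PySem.Str.len row0)).foldl (fun message i =>
      let candidates : List Char := rows.foldl (fun cs row => cs ++ [pyCharD row i]) []
      let counts : List (Int × Char) := chars.foldl (fun cnts c =>
        if PySem.List.count candidates c ≠ 0 then
          cnts ++ [((PySem.List.count candidates c : Int), c)]
        else cnts) []
      let countsS := PySem.List.sorted2 counts (fun t => t.1) (fun t => t.2) rev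
      message ++ [(PySem.List.pyGetD countsS 0 ((0 : Int), ' ')).2]) []
  String.ofList message

-- ===== PORT B =====
-- Python tuple comparison (c1, ch1) < (c2, ch2)
def lexLt (p q : Int × Char) : Bool := p.1 < q.1 || (p.1 == q.1 && p.2 < q.2)

def recover_message_alt (rows : List String) (reversed : Bool) : String :=
  let flag := !reversed
  let ncols : Int := PySem.Str.len (PySem.List.pyGetD rows 0 "")
  let init : List (List Int) := List.replicate ncols.toNat (List.replicate 26 0)
  let table : List (List Int) := rows.foldl (fun tab row =>
      (PySem.List.pyRange 0 ncols).foldl (fun tab i =>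
        let c := pyCharD row i
        if 'a' ≤ c ∧ c ≤ 'z' then tab.modify i.toNat (fun col => col.modify (c.toNat - 97) (· + 1))
        else tab) tab) init
  let message : List Char :=
    (PySem.List.pyRange 0 ncols).foldl (fun (out : List Char) i =>
      let col := PySem.List.pyGetD table i []
      let best := (PySem.List.pyRange 0 26).foldl (fun (best : Option (Int × Char)) k =>
        let cnt := PySem.List.pyGetD col k 0
        if cnt ≠ 0 then
          let cand : Int × Char := (cnt, Char.ofNat (97 + k.toNat))
          match best with
          | none => some cand
          | some b => if (if flag then lexLt b cand else lexLt cand b) then some cand else best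
        else best) none
      out ++ [(best.getD ((0 : Int), ' ')).2]) []
  String.ofList message

-- ===== PRECONDITION & SPEC =====
-- Pre_ excludes exactly the inputs where Python A raises IndexError: empty rows (rows[0]),
-- a row shorter than rows[0] (row[i]), or a column containing no lowercase letter (counts[0]).
def Pre_recover_message (rows : List String) (reversed : Bool) : Prop :=
  rows ≠ [] ∧
  (∀ row ∈ rows, (PySem.List.pyGetD rows 0 "").toList.length ≤ row.toList.length) ∧
  (∀ i : Nat, i < (PySem.List.pyGetD rows 0 "").toList.length →
     ∃ row ∈ rows, 'a' ≤ pyCharD row (i : Int) ∧ pyCharD row (i : Int) ≤ 'z')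
instance (rows : List String) (reversed : Bool) : Decidable (Pre_recover_message rows reversed) := by
  unfold Pre_recover_message; infer_instance
def pvWitness_recover_message : List String × Bool := (["ab", "ba"], false)

def Spec_recover_message (rows : List String) (reversed : Bool) (out : String) : Prop :=
  out = recover_message_alt rows reversed
instance (rows : List String) (reversed : Bool) (out : String) : Decidable (Spec_recover_message rows reversed out) := by
  unfold Spec_recover_message; infer_instance

-- ===== CLAIM (what is proved, stated in full; the proofs are below) =====
def Claim_equal_recover_message : Prop := ∀ (rows : List String) (reversed : Bool), Dom_recover_message rows reversed → Pre_recover_message rows reversed → Spec_recover_message rows reversed (recover_message rows reversed)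

-- ===== LEMMAS AND PROOFS =====

def gch (row : String) (i : Nat) : Char := pyCharD row (i : Int)
def ent (tab : List (List Int)) (i k : Nat) : Int := (tab.getD i []).getD k 0
def colcnt (rows : List String) (i k : Nat) : Int :=
  (rows.countP (fun row => gch row i == Char.ofNat (97 + k)) : Int)
def stepB (row : String) (tab : List (List Int)) (j : Nat) : List (List Int) :=
  if 'a' ≤ gch row j ∧ gch row j ≤ 'z' then
    tab.modify j (fun col => col.modify ((gch row j).toNat - 97) (· + 1))
  else tab
def selStep (flag : Bool) (b? : Option (Int × Char)) (x : Int × Char) : Option (Int × Char) :=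
  match b? with
  | none => some x
  | some b => if (if flag then lexLt b x else lexLt x b) then some x else b?
def shape (N : Nat) (tab : List (List Int)) : Prop :=
  tab.length = N ∧ ∀ col ∈ tab, col.length = 26
def cc (k : Nat) : Char := Char.ofNat (97 + k)

def specSel (rows : List String) (flag : Bool) (i : Nat) : Option (Int × Char) :=
  (List.range 26).foldl (fun b? k =>
    if colcnt rows i k ≠ 0 then selStep flag b? (colcnt rows i k, cc k) else b?) none

lemma low_iff (c : Char) : ('a' ≤ c ∧ c ≤ 'z') ↔ (97 ≤ c.toNat ∧ c.toNat ≤ 122) := by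
  rw [Char.le_def, Char.le_def, UInt32.le_iff_toNat_le, UInt32.le_iff_toNat_le]
  exact Iff.rfl

lemma toNat_ofNat_lower (k : Nat) (hk : k < 26) : (Char.ofNat (97+k)).toNat = 97 + k := by
  interval_cases k <;> decide

lemma char_eq_iff (c : Char) (k : Nat) (hk : k < 26) (h1 : 97 ≤ c.toNat) (h2 : c.toNat ≤ 122) :
    c = Char.ofNat (97+k) ↔ c.toNat - 97 = k := by
  constructor
  · intro h; subst h; have := toNat_ofNat_lower k hk; omega
  · intro h
    have hc : c.toNat = 97 + k := by omega
    calc c = Char.ofNat c.toNat := (Char.ofNat_toNat c).symm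
    _ = Char.ofNat (97+k) := by rw [hc]

lemma getD_modify (l : List (List Int)) (n i : Nat) (f : List Int → List Int) :
    (l.modify n f).getD i [] = if n = i ∧ i < l.length then f (l.getD i []) else l.getD i [] := by
  rw [List.getD_eq_getElem?_getD, List.getD_eq_getElem?_getD, List.getElem?_modify]
  by_cases hi : i < l.length
  · rw [List.getElem?_eq_getElem hi]
    by_cases hni : n = i <;> simp [hni, hi]
  · rw [List.getElem?_eq_none (by omega)]
    simp [hi]

lemma getD_modify' (l : List Int) (n i : Nat) (f : Int → Int) :
    (l.modify n f).getD i 0 = if n = i ∧ i < l.length then f (l.getD i 0) else l.getD i 0 := by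
  rw [List.getD_eq_getElem?_getD, List.getD_eq_getElem?_getD, List.getElem?_modify]
  by_cases hi : i < l.length
  · rw [List.getElem?_eq_getElem hi]
    by_cases hni : n = i <;> simp [hni, hi]
  · rw [List.getElem?_eq_none (by omega)]
    simp [hi]

lemma shape_stepB (row : String) (tab : List (List Int)) {N : Nat} (hs : shape N tab)
    (n : Nat) (hn : n < N) : shape N (stepB row tab n) := by
  unfold stepB
  split
  · refine ⟨by simpa using hs.1, ?_⟩
    intro col hcol
    rw [List.modify_eq_set] at hcol
    rcases List.mem_or_eq_of_mem_set hcol with h | h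
    · exact hs.2 col h
    · have hlt : n < tab.length := by rw [hs.1]; omega
      rw [List.getElem?_eq_getElem hlt] at h
      subst h
      simpa using hs.2 _ (List.getElem_mem hlt)
  · exact hs

lemma ent_stepB (row : String) (tab : List (List Int)) {N : Nat} (hs : shape N tab)
    (n i k : Nat) (hn : n < N) (hk : k < 26) :
    ent (stepB row tab n) i k
      = ent tab i k + (if i = n ∧ gch row n = Char.ofNat (97 + k) then 1 else 0) := by
  unfold stepB ent
  by_cases hlow : 'a' ≤ gch row n ∧ gch row n ≤ 'z'
  · rw [if_pos hlow, getD_modify]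
    have hlow' := (low_iff _).1 hlow
    by_cases hin : i = n
    · subst hin
      have hilt : i < tab.length := by rw [hs.1]; omega
      rw [if_pos ⟨rfl, hilt⟩, getD_modify']
      have hcollen : (tab.getD i []).length = 26 := by
        rw [List.getD_eq_getElem _ _ hilt]
        exact hs.2 _ (List.getElem_mem hilt)
      have hch := char_eq_iff (gch row i) k hk hlow'.1 hlow'.2
      by_cases hm : (gch row i).toNat - 97 = k
      · rw [if_pos ⟨hm, by omega⟩, if_pos ⟨rfl, hch.mpr hm⟩]
      · rw [if_neg (by tauto), if_neg (by rintro ⟨-, h⟩; exact hm (hch.mp h))]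
        omega
    · rw [if_neg (by tauto), if_neg (by tauto)]
      omega
  · rw [if_neg hlow]
    have : ¬ (i = n ∧ gch row n = Char.ofNat (97 + k)) := by
      rintro ⟨-, h⟩
      apply hlow
      rw [h, low_iff]
      have := toNat_ofNat_lower k hk
      omega
    rw [if_neg this]
    omega

lemma inner_fold (row : String) (N : Nat) (n : Nat) (hn : n ≤ N) :
    ∀ tab, shape N tab →
      shape N ((List.range n).foldl (stepB row) tab) ∧
      ∀ i k, k < 26 →
        ent ((List.range n).foldl (stepB row) tab) i k
          = ent tab i k + (if i < n ∧ gch row i = Char.ofNat (97 + k) then 1 else 0) := by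
  induction n with
  | zero => intro tab hs; simp [hs]
  | succ n ih =>
    intro tab hs
    rw [List.range_succ, List.foldl_append]
    obtain ⟨hsT, hent⟩ := ih (by omega) tab hs
    refine ⟨shape_stepB _ _ hsT n (by omega), ?_⟩
    intro i k hk
    rw [List.foldl_cons, List.foldl_nil, ent_stepB _ _ hsT n i k (by omega) hk, hent i k hk]
    by_cases hch : gch row i = Char.ofNat (97 + k)
    · by_cases hilt : i < n
      · rw [if_pos ⟨hilt, hch⟩, if_neg (show ¬(i = n ∧ gch row n = Char.ofNat (97 + k)) by
          rintro ⟨h1, -⟩; omega), if_pos ⟨by omega, hch⟩]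
        omega
      · by_cases hin : i = n
        · rw [if_neg (fun h => hilt h.1), if_pos ⟨hin, hin ▸ hch⟩, if_pos ⟨by omega, hch⟩]
          omega
        · rw [if_neg (fun h => hilt h.1), if_neg (fun h => hin h.1),
            if_neg (show ¬(i < n + 1 ∧ gch row i = Char.ofNat (97 + k)) by
              rintro ⟨h1, -⟩; omega)]
          omega
    · have h2 : ¬(i = n ∧ gch row n = Char.ofNat (97 + k)) :=
        fun h => hch (by rw [h.1]; exact h.2)
      simp only [hch, and_false, if_false, if_neg h2]
      omega

lemma outer_fold (N : Nat) (rows : List String) :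
    ∀ tab, shape N tab →
      shape N (rows.foldl (fun tab row => (List.range N).foldl (stepB row) tab) tab) ∧
      ∀ i k, i < N → k < 26 →
        ent (rows.foldl (fun tab row => (List.range N).foldl (stepB row) tab) tab) i k
          = ent tab i k + colcnt rows i k := by
  induction rows with
  | nil => intro tab hs; simp [hs, colcnt]
  | cons r rs ih =>
    intro tab hs
    rw [List.foldl_cons]
    obtain ⟨hsT, hentT⟩ := inner_fold r N N (le_refl N) tab hs
    obtain ⟨hsF, hentF⟩ := ih _ hsT
    refine ⟨hsF, ?_⟩
    intro i k hi hk
    rw [hentF i k hi hk, hentT i k hk]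
    unfold colcnt
    rw [List.countP_cons]
    by_cases hch : gch r i = Char.ofNat (97 + k)
    · rw [if_pos ⟨hi, hch⟩]
      simp [hch]
      omega
    · rw [if_neg (by tauto)]
      simp [hch]

lemma head_foldl_insertBy {α : Type} (before : α → α → Bool) (L : List α) :
    ∀ acc : List α,
      ((L.foldl (fun acc x => PySem.List.insertBy before x acc) acc).head?) =
        L.foldl (fun h? x => match h? with
          | none => some x
          | some h => if before x h then some x else some h) acc.head? := by
  induction L with
  | nil => intro acc; rfl
  | cons x L ih =>
    intro acc
    simp only [List.foldl_cons]
    rw [ih]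
    congr 1
    cases acc <;> simp [PySem.List.insertBy] <;> split <;> simp

lemma lt_eq_lexLt (a b : Int × Char) :
    (decide (a.1 < b.1) || (!decide (b.1 < a.1) && decide (a.2 < b.2))) = lexLt a b := by
  unfold lexLt
  rcases lt_trichotomy a.1 b.1 with h|h|h <;> simp [h, not_lt_of_gt, ne_of_gt]

lemma pyGetD_zero {α : Type} (xs : List α) (d : α) :
    PySem.List.pyGetD xs 0 d = (xs.head?).getD d := by
  cases xs <;> simp [PySem.List.pyGetD, PySem.List.pyIdx?, PySem.List.pyGet?]

lemma chars_eq :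
    (PySem.List.pyRange 97 123).map (fun n => Char.ofNat n.toNat) = (List.range 26).map cc := by
  decide

lemma count_map_eq (rows : List String) (i : Nat) (c : Char) :
    PySem.List.count (rows.map fun row => pyCharD row (i : Int)) c
      = rows.countP (fun row => gch row i == c) := by
  rw [PySem.List.count_eq, List.count_eq_countP, List.countP_map]
  rfl

lemma A_col (rows : List String) (flag : Bool) (i : Nat) :
    (PySem.List.sorted2
      (((PySem.List.pyRange 97 123).map (fun n => Char.ofNat n.toNat)).foldl (fun cnts c =>
        if PySem.List.count (rows.foldl (fun cs row => cs ++ [pyCharD row (i : Int)]) []) c ≠ 0 then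
          cnts ++ [((PySem.List.count (rows.foldl (fun cs row => cs ++ [pyCharD row (i : Int)]) []) c : Int), c)]
        else cnts) [])
      (fun t => t.1) (fun t => t.2) flag).head? = specSel rows flag i := by
  rw [PySem.List.foldl_append_singleton_eq_map, List.nil_append]
  rw [PySem.List.foldl_append_ite
    (p := fun c => PySem.List.count (rows.map fun row => pyCharD row (i : Int)) c ≠ 0)
    (f := fun c => ((PySem.List.count (rows.map fun row => pyCharD row (i : Int)) c : Int), c)),
    List.nil_append]
  simp only [PySem.List.sorted2]
  rw [head_foldl_insertBy]
  rw [List.foldl_map, ← PySem.List.foldl_ite_eq_foldl_filter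
    (p := fun c => PySem.List.count (rows.map fun row => pyCharD row (i : Int)) c ≠ 0)]
  rw [chars_eq, List.foldl_map]
  unfold specSel
  apply PySem.List.foldl_congr_mem
  intro b? k hk
  rw [List.mem_range] at hk
  have hcnt : (PySem.List.count (rows.map fun row => pyCharD row (i : Int)) (cc k) : Int)
      = colcnt rows i k := by
    rw [count_map_eq]; rfl
  have hne : (PySem.List.count (rows.map fun row => pyCharD row (i : Int)) (cc k) ≠ 0)
      ↔ (colcnt rows i k ≠ 0) := by
    rw [← hcnt]; omega
  by_cases h : colcnt rows i k ≠ 0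
  · rw [if_pos (hne.mpr h), if_pos h, ← hcnt]
    cases b? with
    | none => rfl
    | some b =>
      cases flag <;>
        simp only [selStep, Bool.false_eq_true, if_true, if_false, lt_eq_lexLt]
  · rw [if_neg (fun hh => h (hne.mp hh)), if_neg h]

lemma tableB_eq (rows : List String) (N : Nat) :
    (rows.foldl (fun tab row =>
      (PySem.List.pyRange 0 (N : Int)).foldl (fun tab i =>
        let c := pyCharD row i
        if 'a' ≤ c ∧ c ≤ 'z' then tab.modify i.toNat (fun col => col.modify (c.toNat - 97) (· + 1))
        else tab) tab) (List.replicate ((N : Int)).toNat (List.replicate 26 0)))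
      = rows.foldl (fun tab row => (List.range N).foldl (stepB row) tab)
          (List.replicate N (List.replicate 26 0)) := by
  simp only [PySem.List.pyRange_zero_natCast, List.foldl_map, Int.toNat_natCast]
  rfl

lemma hshape0 (N : Nat) : shape N (List.replicate N (List.replicate 26 0)) := by
  refine ⟨by simp, ?_⟩
  intro col h
  rw [List.eq_of_mem_replicate h]
  simp

lemma ent_init (N i k : Nat) (hi : i < N) (hk : k < 26) :
    ent (List.replicate N (List.replicate 26 0)) i k = 0 := by
  unfold ent
  rw [List.getD_replicate _ hi, List.getD_replicate _ hk]

lemma B_col (rows : List String) (flag : Bool) (N i : Nat) (hi : i < N) :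
    ((PySem.List.pyRange 0 26).foldl (fun (best : Option (Int × Char)) k =>
      let cnt := PySem.List.pyGetD
        (PySem.List.pyGetD
          (rows.foldl (fun tab row => (List.range N).foldl (stepB row) tab)
            (List.replicate N (List.replicate 26 0))) (i : Int) [])
        k 0
      if cnt ≠ 0 then
        let cand : Int × Char := (cnt, Char.ofNat (97 + k.toNat))
        match best with
        | none => some cand
        | some b => if (if flag then lexLt b cand else lexLt cand b) then some cand else best
      else best) none) = specSel rows flag i := by
  obtain ⟨hsT, hentT⟩ := outer_fold N rows _ (hshape0 N)
  rw [show (26 : Int) = ((26 : Nat) : Int) from rfl, PySem.List.pyRange_zero_natCast,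
    List.foldl_map]
  unfold specSel
  apply PySem.List.foldl_congr_mem
  intro b? k hk
  rw [List.mem_range] at hk
  simp only [PySem.List.pyGetD_natCast, Int.toNat_natCast]
  have hcnt : ent (rows.foldl (fun tab row => (List.range N).foldl (stepB row) tab)
      (List.replicate N (List.replicate 26 0))) i k = colcnt rows i k := by
    rw [hentT i k hi hk, ent_init N i k hi hk]
    omega
  unfold ent at hcnt
  rw [hcnt]
  by_cases h : colcnt rows i k ≠ 0
  · rw [if_pos h, if_pos h]
    cases b? <;> rfl
  · rw [if_neg h, if_neg h]

lemma main_eq (rows : List String) (reversed : Bool) :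
    recover_message rows reversed = recover_message_alt rows reversed := by
  unfold recover_message recover_message_alt
  simp only [PySem.Str.len_eq]
  rw [tableB_eq rows (PySem.List.pyGetD rows 0 "").toList.length]
  rw [PySem.List.pyRange_zero_natCast, List.foldl_map, List.foldl_map]
  rw [PySem.List.foldl_append_singleton_eq_map, PySem.List.foldl_append_singleton_eq_map,
    List.nil_append, List.nil_append]
  apply congrArg String.ofList
  apply List.map_congr_left
  intro i hi
  rw [List.mem_range] at hi
  rw [B_col rows (!reversed) _ i hi]
  rw [pyGetD_zero, A_col rows (!reversed) i]

-- ===== VERDICT (by name: the statement is the Claim_ definition above) =====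
theorem recover_message_spec : Claim_equal_recover_message := by
  intro rows reversed _dom _pre
  unfold Spec_recover_message
  exact main_eq rows reversed
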